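-- pv_equiv track=rewrite | github.com/maxnelso/algorithms_competitions | top_coder/SRM 552/FoxPickingFlowersDivTwo.py | theMaxFlowers
-- ===== SOURCE A (Python) =====
-- def theMaxFlowers(flowers, r, c):
--   left, right, up, down = 0, 0, 0, 0
--   for i in range(len(flowers)):
--     for j in range(len(flowers[i])):
--       if flowers[i][j] == 'F':
--         if i < r:
--           left += 1
--         if i > r:
--           right += 1
--         if j < c:
--           down += 1
--         if j > c:
--           up += 1
--   return max(left, right, up, down)
-- ===== SOURCE B (Python) =====
-- def _row_count(row):
--     return sum(1 for ch in row if ch == 'F')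
--
-- def theMaxFlowers(flowers, r, c):
--     left = sum(_row_count(row) for i, row in enumerate(flowers) if i < r)
--     right = sum(_row_count(row) for i, row in enumerate(flowers) if i > r)
--     down = sum(1 for row in flowers for j, ch in enumerate(row) if ch == 'F' and j < c)
--     up = sum(1 for row in flowers for j, ch in enumerate(row) if ch == 'F' and j > c)
--     return max(left, right, up, down)
-- ===== Notes on version B (the rewrite author's own statement) =====
-- stated objective: simpler
-- what changed: Replaces the single nested loop that threads four counters through every cell with four independent aggregations: left/right as sums of per-row 'F' counts over rows below/above r, and down/up as sums of per-row column-filtered counts.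
import Mathlib
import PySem

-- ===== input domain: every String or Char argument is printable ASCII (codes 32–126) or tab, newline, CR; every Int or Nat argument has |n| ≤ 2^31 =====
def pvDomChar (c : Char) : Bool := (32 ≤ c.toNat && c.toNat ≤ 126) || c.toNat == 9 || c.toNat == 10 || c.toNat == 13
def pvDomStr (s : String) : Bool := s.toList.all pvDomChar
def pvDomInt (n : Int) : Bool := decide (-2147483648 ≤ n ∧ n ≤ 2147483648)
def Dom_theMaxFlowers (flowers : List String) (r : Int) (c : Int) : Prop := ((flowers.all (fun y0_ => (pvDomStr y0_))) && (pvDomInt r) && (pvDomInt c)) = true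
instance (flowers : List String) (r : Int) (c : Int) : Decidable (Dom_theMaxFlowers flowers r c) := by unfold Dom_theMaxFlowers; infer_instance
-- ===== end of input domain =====

-- B replaces A's single nested loop with four counters by four independent row/column aggregations (simpler decomposition; same cost).

-- ===== PORT A =====
-- inner loop: for j in range(len(flowers[i])), threading (left, right, up, down)
def pvA_inner (r c : Int) (i : Int) (j : Int) (row : List Char) (st : Int × Int × Int × Int) : Int × Int × Int × Int :=
  match row with
  | [] => st
  | ch :: rest =>
      let st1 := if ch = 'F' then
          ((if i < r then st.1 + 1 else st.1),
           (if i > r then st.2.1 + 1 else st.2.1),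
           (if j > c then st.2.2.1 + 1 else st.2.2.1),
           (if j < c then st.2.2.2 + 1 else st.2.2.2))
        else st
      pvA_inner r c i (j + 1) rest st1

-- outer loop: for i in range(len(flowers))
def pvA_outer (r c : Int) (i : Int) (rows : List String) (st : Int × Int × Int × Int) : Int × Int × Int × Int :=
  match rows with
  | [] => st
  | row :: rest => pvA_outer r c (i + 1) rest (pvA_inner r c i 0 row.toList st)

def theMaxFlowers (flowers : List String) (r : Int) (c : Int) : Int :=
  let st := pvA_outer r c 0 flowers (0, 0, 0, 0)
  max st.1 (max st.2.1 (max st.2.2.1 st.2.2.2))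

-- ===== PORT B =====
-- _row_count(row) = sum(1 for ch in row if ch == 'F')
def pvRowCount (row : List Char) : Int := ((row.filter (fun ch => ch = 'F')).length : Int)

def theMaxFlowers_alt (flowers : List String) (r : Int) (c : Int) : Int :=
  let left := (((PySem.List.enumerate flowers 0).filter (fun p => p.1 < r)).map (fun p => pvRowCount p.2.toList)).sum
  let right := (((PySem.List.enumerate flowers 0).filter (fun p => p.1 > r)).map (fun p => pvRowCount p.2.toList)).sum
  let down := (flowers.map (fun row => (((PySem.List.enumerate row.toList 0).filter (fun q => q.2 = 'F' && q.1 < c)).length : Int))).sum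
  let up := (flowers.map (fun row => (((PySem.List.enumerate row.toList 0).filter (fun q => q.2 = 'F' && q.1 > c)).length : Int))).sum
  max left (max right (max up down))

-- ===== PRECONDITION & SPEC =====
def Spec_theMaxFlowers (flowers : List String) (r : Int) (c : Int) (out : Int) : Prop := out = theMaxFlowers_alt flowers r c
instance (flowers : List String) (r : Int) (c : Int) (out : Int) : Decidable (Spec_theMaxFlowers flowers r c out) := by unfold Spec_theMaxFlowers; infer_instance

-- ===== CLAIM (what is proved, stated in full; the proofs are below) =====
def Claim_equal_theMaxFlowers : Prop := ∀ (flowers : List String) (r : Int) (c : Int), Dom_theMaxFlowers flowers r c → Spec_theMaxFlowers flowers r c (theMaxFlowers flowers r c)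

-- ===== LEMMAS AND PROOFS =====
theorem pvA_inner_eq (r c i : Int) :
    ∀ (row : List Char) (j l rr u d : Int),
      pvA_inner r c i j row (l, rr, u, d) =
        (l + (if i < r then pvRowCount row else 0),
         rr + (if i > r then pvRowCount row else 0),
         u + (((PySem.List.enumerate row j).filter (fun q => q.2 = 'F' && q.1 > c)).length : Int),
         d + (((PySem.List.enumerate row j).filter (fun q => q.2 = 'F' && q.1 < c)).length : Int)) := by
  intro row
  induction row with
  | nil => intro j l rr u d; simp [pvA_inner, pvRowCount, PySem.List.enumerate_nil]
  | cons ch rest ih =>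
      intro j l rr u d
      by_cases hF : ch = 'F'
      · subst hF
        simp only [pvA_inner, if_true, ih, pvRowCount, PySem.List.enumerate_cons,
          List.filter_cons, decide_true, Bool.true_and, List.length_cons, Prod.mk.injEq, decide_eq_true_eq]
        refine ⟨?_, ?_, ?_, ?_⟩ <;> split_ifs <;> (try simp only [List.length_cons]) <;>
          push_cast <;> omega
      · simp [pvA_inner, hF, ih, pvRowCount, PySem.List.enumerate_cons]

theorem pvA_outer_eq (r c : Int) :
    ∀ (rows : List String) (i l rr u d : Int),
      pvA_outer r c i rows (l, rr, u, d) =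
        (l + (((PySem.List.enumerate rows i).filter (fun p => p.1 < r)).map (fun p => pvRowCount p.2.toList)).sum,
         rr + (((PySem.List.enumerate rows i).filter (fun p => p.1 > r)).map (fun p => pvRowCount p.2.toList)).sum,
         u + (rows.map (fun row => (((PySem.List.enumerate row.toList 0).filter (fun q => q.2 = 'F' && q.1 > c)).length : Int))).sum,
         d + (rows.map (fun row => (((PySem.List.enumerate row.toList 0).filter (fun q => q.2 = 'F' && q.1 < c)).length : Int))).sum) := by
  intro rows
  induction rows with
  | nil => intro i l rr u d; simp [pvA_outer, PySem.List.enumerate_nil]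
  | cons row rest ih =>
      intro i l rr u d
      simp only [pvA_outer, pvA_inner_eq, ih, PySem.List.enumerate_cons, List.filter_cons,
        List.map_cons, List.sum_cons, Prod.mk.injEq, decide_eq_true_eq]
      refine ⟨?_, ?_, ?_, ?_⟩ <;> (try split_ifs) <;>
        (try simp only [List.map_cons, List.sum_cons]) <;> ring

-- ===== VERDICT (by name: the statement is the Claim_ definition above) =====
theorem theMaxFlowers_spec : Claim_equal_theMaxFlowers := by
  intro flowers r c _
  unfold Spec_theMaxFlowers theMaxFlowers theMaxFlowers_alt
  simp only [pvA_outer_eq, zero_add]
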